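-- pv_equiv track=rewrite | github.com/DyogoBendo/exercicios-maratona-programacao | eduarda/pset3/glider.py | max_size
-- ===== SOURCE A (Python) =====
-- def max_size(sequence, n, h):
--     max_length = sequence[0][1] - sequence[0][0]
--     answer = max_length
--     height = last = 0
--
--     for i in range(1, n):
--         height += sequence[i][0] - sequence[i - 1][1]
--         while(height >= h):
--             height -= sequence[last + 1][0] - sequence[last][1]
--             max_length -= sequence[last][1] - sequence[last][0]
--             last += 1
--         max_length += sequence[i][1] - sequence[i][0]
--         if answer < max_length:
--             answer = max_length
--     return answer + h
-- ===== SOURCE B (Python) =====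
-- def max_size(sequence, n, h):
--     # Keep the current window as an explicit functional queue of intervals
--     # (two stacks: `front` holds the oldest items reversed, `back` the newest),
--     # iterating over the interval elements themselves instead of index arithmetic.
--     first = sequence[0]
--     front = [first]          # oldest element at the end (pop() removes the oldest)
--     back = []                # newest element at the end
--     covered = first[1] - first[0]
--     best = covered
--     height = 0
--     prev_end = first[1]
--     for cur in sequence[1:max(n, 0)]:
--         height += cur[0] - prev_end
--         while height >= h:
--             if not front:
--                 front, back = back[::-1], []
--             a, b = front.pop()
--             if front:
--                 nxt = front[-1]
--             elif back:
--                 nxt = back[0]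
--             else:
--                 nxt = cur
--             height -= nxt[0] - b
--             covered -= b - a
--         back.append(cur)
--         covered += cur[1] - cur[0]
--         if covered > best:
--             best = covered
--         prev_end = cur[1]
--     return best + h
-- ===== Notes on version B (the rewrite author's own statement) =====
-- stated objective: alternative
-- what changed: B replaces A's index arithmetic (i/last pointers into sequence with a running height patched via sequence[last+1][0]-sequence[last][1]) by iterating over the interval elements themselves and maintaining the current window as an explicit functional queue of intervals (two stacks), popping whole intervals off the queue head while the climb is too high.
-- outside the precondition, e.g. on max_size([(8, -9), (6, -4), (10, 1)], 2, -2): A returns -2, B raises IndexError; on max_size([(3, 4), (5, -5), (9, -3), (5, -5)], 3, -4): A returns -3, B raises IndexError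
import Mathlib
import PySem

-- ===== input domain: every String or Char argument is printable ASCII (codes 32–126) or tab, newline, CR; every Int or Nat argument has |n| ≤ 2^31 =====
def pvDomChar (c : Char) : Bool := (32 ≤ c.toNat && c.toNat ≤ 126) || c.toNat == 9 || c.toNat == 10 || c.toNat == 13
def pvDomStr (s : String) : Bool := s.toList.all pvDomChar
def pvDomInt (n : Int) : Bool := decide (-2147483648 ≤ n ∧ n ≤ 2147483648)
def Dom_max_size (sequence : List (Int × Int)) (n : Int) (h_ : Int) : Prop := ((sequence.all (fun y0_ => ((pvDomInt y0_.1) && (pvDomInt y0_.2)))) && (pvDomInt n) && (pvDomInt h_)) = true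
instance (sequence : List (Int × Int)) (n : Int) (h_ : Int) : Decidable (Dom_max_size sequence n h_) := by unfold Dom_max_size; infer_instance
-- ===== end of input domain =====

-- B drops A's index arithmetic and instead iterates over the interval elements, keeping the
-- current window as an explicit functional queue of intervals (two stacks); equal cost.

-- ===== PORT A =====
-- the 'while(height >= h)' loop; fuel makes it total (under Pre_ the loop stops before fuel runs out)
def msAWhile (seq : List (Int × Int)) (h_ : Int) : Nat → Int → Int → Int → (Int × Int × Int)
  | 0, height, maxlen, last => (height, maxlen, last)
  | fuel+1, height, maxlen, last =>
    if height ≥ h_ then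
      msAWhile seq h_ fuel
        (height - ((PySem.List.pyGetD seq (last+1) (0,0)).1 - (PySem.List.pyGetD seq last (0,0)).2))
        (maxlen - ((PySem.List.pyGetD seq last (0,0)).2 - (PySem.List.pyGetD seq last (0,0)).1))
        (last+1)
    else (height, maxlen, last)

def max_size (sequence : List (Int × Int)) (n : Int) (h_ : Int) : Int :=
  -- sequence[0] raises on []; Pre_ excludes that, the default is never read there
  let ml0 := (PySem.List.pyGetD sequence 0 (0,0)).2 - (PySem.List.pyGetD sequence 0 (0,0)).1
  -- state: (answer, max_length, height, last)
  let st := (PySem.List.pyRange 1 n 1).foldl (fun (st : Int × Int × Int × Int) i =>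
    let height := st.2.2.1 + ((PySem.List.pyGetD sequence i (0,0)).1 - (PySem.List.pyGetD sequence (i-1) (0,0)).2)
    let r := msAWhile sequence h_ sequence.length height st.2.1 st.2.2.2
    let maxlen := r.2.1 + ((PySem.List.pyGetD sequence i (0,0)).2 - (PySem.List.pyGetD sequence i (0,0)).1)
    let answer := if st.1 < maxlen then maxlen else st.1
    (answer, maxlen, r.1, r.2.2)) (ml0, ml0, 0, 0)
  st.1 + h_

-- ===== PORT B =====
-- the 'while height >= h' pop loop on the two-stack queue; fuel makes it total
-- (under Pre_ the loop stops before fuel runs out; front.pop() on an empty queue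
-- raises in Python — Pre_ excludes that, the defaults are never read there)
def msBWhile (h_ : Int) (cur : Int × Int) :
    Nat → List (Int × Int) → List (Int × Int) → Int → Int →
    (List (Int × Int)) × (List (Int × Int)) × Int × Int
  | 0, front, back, covered, height => (front, back, covered, height)
  | fuel+1, front, back, covered, height =>
    if height ≥ h_ then
      let front1 := if front.isEmpty then back.reverse else front
      let back1 := if front.isEmpty then [] else back
      let ab := front1.getLastD (0, 0)
      let front2 := front1.dropLast
      let nxt := if ¬ front2.isEmpty then front2.getLastD (0, 0)
                 else if ¬ back1.isEmpty then back1.headD (0, 0)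
                 else cur
      msBWhile h_ cur fuel front2 back1 (covered - (ab.2 - ab.1)) (height - (nxt.1 - ab.2))
    else (front, back, covered, height)

def max_size_alt (sequence : List (Int × Int)) (n : Int) (h_ : Int) : Int :=
  -- sequence[0] raises on []; Pre_ excludes that, the default is never read there
  let first := PySem.List.pyGetD sequence 0 (0, 0)
  -- state: (front, back, covered, best, height, prev_end)
  let st := (PySem.List.slice sequence (some 1) (some (max n 0))).foldl
    (fun (st : (List (Int × Int)) × (List (Int × Int)) × Int × Int × Int × Int) cur =>
      let height := st.2.2.2.2.1 + (cur.1 - st.2.2.2.2.2)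
      let r := msBWhile h_ cur (st.1.length + st.2.1.length + 1) st.1 st.2.1 st.2.2.1 height
      let covered := r.2.2.1 + (cur.2 - cur.1)
      let best := if covered > st.2.2.2.1 then covered else st.2.2.2.1
      (r.1, r.2.1 ++ [cur], covered, best, r.2.2.2, cur.2))
    ([first], [], first.2 - first.1, first.2 - first.1, 0, first.2)
  st.2.2.2.1 + h_

-- ===== PRECONDITION & SPEC =====
-- Pre_ excludes: empty sequence or n > len(sequence) (A raises IndexError); and h ≤ 0 with
-- 2 ≤ n, where A sometimes still returns a value (its pointer happens to walk onto elements
-- beyond the window without overrunning) but B's natural queue drains and raises IndexError.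
def Pre_max_size (sequence : List (Int × Int)) (n : Int) (h_ : Int) : Prop :=
  sequence ≠ [] ∧ n ≤ sequence.length ∧ (n ≤ 1 ∨ 0 < h_)
instance (sequence : List (Int × Int)) (n : Int) (h_ : Int) : Decidable (Pre_max_size sequence n h_) := by
  unfold Pre_max_size; infer_instance

def pvWitness_max_size : (List (Int × Int)) × Int × Int := ([(0, 2), (5, 7)], 2, 4)

def Spec_max_size (sequence : List (Int × Int)) (n : Int) (h_ : Int) (out : Int) : Prop := out = max_size_alt sequence n h_
instance (sequence : List (Int × Int)) (n : Int) (h_ : Int) (out : Int) : Decidable (Spec_max_size sequence n h_ out) := by unfold Spec_max_size; infer_instance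

-- ===== CLAIM (what is proved, stated in full; the proofs are below) =====
def Claim_equal_max_size : Prop := ∀ (sequence : List (Int × Int)) (n : Int) (h_ : Int), Dom_max_size sequence n h_ → Pre_max_size sequence n h_ → Spec_max_size sequence n h_ (max_size sequence n h_)

-- ===== LEMMAS AND PROOFS =====

-- prefix gap sums: gAux k = cumulative gap up to interval k
def gAux (seq : List (Int × Int)) : Nat → Int
  | 0 => 0
  | k+1 => gAux seq k + ((seq.getD (k+1) (0,0)).1 - (seq.getD k (0,0)).2)

-- prefix covered lengths: lAux k = total covered length of the first k intervals
def lAux (seq : List (Int × Int)) : Nat → Int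
  | 0 => 0
  | k+1 => lAux seq k + ((seq.getD k (0,0)).2 - (seq.getD k (0,0)).1)

-- the common pointer advance, on the spec level
def adv (seq : List (Int × Int)) (h_ : Int) (i : Nat) : Nat → Nat → Nat
  | 0, l => l
  | fuel+1, l => if gAux seq i - gAux seq l ≥ h_ then adv seq h_ i fuel (l+1) else l

-- the window of intervals l, l+1, …, k-1
def winList (seq : List (Int × Int)) (l k : Nat) : List (Int × Int) :=
  (List.range (k - l)).map (fun j => seq.getD (l + j) (0,0))

theorem adv_self (seq : List (Int × Int)) (h_ : Int) (i : Nat) (hpos : 0 < h_) :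
    ∀ fuel, adv seq h_ i fuel i = i := by
  intro fuel
  cases fuel with
  | zero => rfl
  | succ f => simp [adv]; omega

theorem adv_le (seq : List (Int × Int)) (h_ : Int) (i : Nat) (hpos : 0 < h_) :
    ∀ fuel l, l ≤ i → adv seq h_ i fuel l ≤ i := by
  intro fuel
  induction fuel with
  | zero => intro l hl; exact hl
  | succ f ih =>
    intro l hl
    rcases eq_or_lt_of_le hl with rfl | hlt
    · rw [adv_self seq h_ l hpos]
    · simp only [adv]
      split
      · exact ih (l+1) hlt
      · exact hl

theorem adv_stable (seq : List (Int × Int)) (h_ : Int) (i : Nat) (hpos : 0 < h_) :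
    ∀ f₁ f₂ l, l ≤ i → i - l ≤ f₁ → i - l ≤ f₂ →
      adv seq h_ i f₁ l = adv seq h_ i f₂ l := by
  intro f₁
  induction f₁ with
  | zero =>
    intro f₂ l hl h1 h2
    have : l = i := by omega
    subst this
    exact (adv_self seq h_ l hpos f₂).symm
  | succ f ih =>
    intro f₂ l hl h1 h2
    rcases eq_or_lt_of_le hl with rfl | hlt
    · rw [adv_self seq h_ l hpos, adv_self seq h_ l hpos]
    · obtain ⟨g, rfl⟩ : ∃ g, f₂ = g + 1 := ⟨f₂ - 1, by omega⟩
      simp only [adv]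
      split
      · exact ih g (l+1) hlt (by omega) (by omega)
      · rfl

-- A's while loop computes the spec advance
theorem msAWhile_eq (seq : List (Int × Int)) (h_ : Int) (i : Nat) :
    ∀ fuel (l : Nat) (ml : Int),
      msAWhile seq h_ fuel (gAux seq i - gAux seq l) ml (l : Int) =
        (gAux seq i - gAux seq (adv seq h_ i fuel l),
         ml - (lAux seq (adv seq h_ i fuel l) - lAux seq l),
         ((adv seq h_ i fuel l : Nat) : Int)) := by
  intro fuel
  induction fuel with
  | zero => intro l ml; simp [msAWhile, adv]
  | succ f ih =>
    intro l ml
    simp only [msAWhile, adv]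
    by_cases hc : gAux seq i - gAux seq l ≥ h_
    · simp only [if_pos hc]
      have hcast : (l : Int) + 1 = ((l + 1 : Nat) : Int) := by push_cast; ring
      rw [hcast, PySem.List.pyGetD_natCast, PySem.List.pyGetD_natCast,
        show gAux seq i - gAux seq l - ((seq.getD (l+1) (0,0)).1 - (seq.getD l (0,0)).2)
          = gAux seq i - gAux seq (l+1) by simp only [gAux]; ring,
        show ml - ((seq.getD l (0,0)).2 - (seq.getD l (0,0)).1)
          = ml - (lAux seq (l+1) - lAux seq l) by simp only [lAux]; ring,
        ih (l+1)]
      simp only [Prod.mk.injEq, true_and, and_true]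
      ring
    · simp [hc]

-- spec recurrences
def specL (seq : List (Int × Int)) (h_ : Int) : Nat → Nat
  | 0 => 0
  | i+1 => adv seq h_ (i+1) (i+1) (specL seq h_ i)

def specW (seq : List (Int × Int)) (h_ : Int) (i : Nat) : Int :=
  lAux seq (i+1) - lAux seq (specL seq h_ i)

def specAns (seq : List (Int × Int)) (h_ : Int) : Nat → Int
  | 0 => specW seq h_ 0
  | i+1 => if specAns seq h_ i < specW seq h_ (i+1) then specW seq h_ (i+1) else specAns seq h_ i

theorem specL_le (seq : List (Int × Int)) (h_ : Int) (hpos : 0 < h_) :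
    ∀ i, specL seq h_ i ≤ i := by
  intro i
  induction i with
  | zero => exact le_refl 0
  | succ k ih => exact adv_le seq h_ (k+1) hpos (k+1) (specL seq h_ k) (by omega)

-- A's main fold invariant
theorem A_main (seq : List (Int × Int)) (h_ : Int) (hpos : 0 < h_) :
    ∀ m : Nat, 1 ≤ m → m ≤ seq.length →
      (PySem.List.pyRange 1 (m : Int) 1).foldl (fun (st : Int × Int × Int × Int) i =>
        let height := st.2.2.1 + ((PySem.List.pyGetD seq i (0,0)).1 - (PySem.List.pyGetD seq (i-1) (0,0)).2)
        let r := msAWhile seq h_ seq.length height st.2.1 st.2.2.2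
        let maxlen := r.2.1 + ((PySem.List.pyGetD seq i (0,0)).2 - (PySem.List.pyGetD seq i (0,0)).1)
        let answer := if st.1 < maxlen then maxlen else st.1
        (answer, maxlen, r.1, r.2.2))
        (lAux seq 1, lAux seq 1, 0, 0) =
      (specAns seq h_ (m-1), specW seq h_ (m-1),
       gAux seq (m-1) - gAux seq (specL seq h_ (m-1)), ((specL seq h_ (m-1) : Nat) : Int)) := by
  intro m
  induction m with
  | zero => omega
  | succ m ih =>
    intro h1 hlen
    rcases Nat.eq_zero_or_pos m with rfl | hm
    · rw [show ((0+1 : Nat) : Int) = 1 by norm_num, PySem.List.pyRange_one_eq_nil (le_refl 1)]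
      simp [specAns, specW, specL, lAux, gAux]
    · obtain ⟨k, rfl⟩ : ∃ k, m = k + 1 := ⟨m - 1, by omega⟩
      have hrange : PySem.List.pyRange 1 ((k+1+1 : Nat) : Int) 1 =
          PySem.List.pyRange 1 ((k+1 : Nat) : Int) 1 ++ [((k+1 : Nat) : Int)] := by
        rw [show ((k+1+1 : Nat) : Int) = ((k+1 : Nat) : Int) + 1 by push_cast; ring]
        exact PySem.List.pyRange_one_succ_right (by omega)
      rw [hrange, List.foldl_append, ih (by omega) (by omega)]
      simp only [List.foldl_cons, List.foldl_nil]
      have e1 : ((k+1 : Nat) : Int) - 1 = ((k : Nat) : Int) := by push_cast; ring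
      simp only [e1, PySem.List.pyGetD_natCast, Nat.add_sub_cancel]
      rw [show gAux seq k - gAux seq (specL seq h_ k) +
            ((seq.getD (k+1) (0,0)).1 - (seq.getD k (0,0)).2)
          = gAux seq (k+1) - gAux seq (specL seq h_ k) by simp only [gAux]; ring]
      rw [msAWhile_eq seq h_ (k+1) seq.length (specL seq h_ k) (specW seq h_ k)]
      have hadv : adv seq h_ (k+1) seq.length (specL seq h_ k) = specL seq h_ (k+1) := by
        have hle : specL seq h_ k ≤ k + 1 := le_trans (specL_le seq h_ hpos k) (by omega)
        exact adv_stable seq h_ (k+1) hpos seq.length (k+1) (specL seq h_ k) hle (by omega) (by omega)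
      rw [hadv]
      rw [show specW seq h_ k - (lAux seq (specL seq h_ (k+1)) - lAux seq (specL seq h_ k)) +
            ((seq.getD (k+1) (0,0)).2 - (seq.getD (k+1) (0,0)).1)
          = specW seq h_ (k+1) by simp only [specW, lAux]; ring]
      simp only [specAns]

-- window list facts
theorem winList_nil (seq : List (Int × Int)) (l : Nat) : winList seq l l = [] := by
  simp [winList]

theorem winList_cons (seq : List (Int × Int)) (l k : Nat) (h : l < k) :
    winList seq l k = seq.getD l (0,0) :: winList seq (l+1) k := by
  unfold winList
  rw [show k - l = (k - (l+1)) + 1 by omega, List.range_succ_eq_map]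
  simp only [List.map_cons, List.map_map, Nat.add_zero, List.cons.injEq, true_and]
  apply List.map_congr_left
  intro j _
  simp only [Function.comp_apply]
  congr 1
  omega

theorem winList_append (seq : List (Int × Int)) (l k : Nat) (h : l ≤ k) :
    winList seq l (k+1) = winList seq l k ++ [seq.getD k (0,0)] := by
  unfold winList
  rw [show k + 1 - l = (k - l) + 1 by omega, List.range_succ, List.map_append]
  simp only [List.map_cons, List.map_nil]
  rw [show l + (k - l) = k by omega]

theorem winList_length (seq : List (Int × Int)) (l k : Nat) :
    (winList seq l k).length = k - l := by
  simp [winList]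

-- the next-head selection of the two-stack queue
theorem nxt_spec (fr bk rest : List (Int × Int)) (cur x : Int × Int)
    (h : fr.reverse ++ bk = rest) (hx : rest = [] → cur = x)
    (hx2 : rest ≠ [] → rest.headD (0,0) = x) :
    (if ¬ fr.isEmpty then fr.getLastD (0,0)
     else if ¬ bk.isEmpty then bk.headD (0,0) else cur) = x := by
  rcases List.eq_nil_or_concat fr with rfl | ⟨fs, a, rfl⟩
  · simp only [List.reverse_nil, List.nil_append] at h
    subst h
    rcases bk with _ | ⟨b, bs⟩
    · simpa using hx rfl
    · simpa using hx2 (by simp)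
  · rw [List.concat_eq_append] at h ⊢
    have hne : rest ≠ [] := by
      rw [← h]; simp
    have hh : rest.headD (0,0) = a := by
      rw [← h, List.reverse_append]
      simp
    have hcond : ¬ ((fs ++ [a]).isEmpty = true) := by simp
    rw [if_pos hcond]
    rw [List.getLastD_eq_getLast?, List.getLast?_concat, Option.getD_some]
    rw [← hx2 hne, hh]

-- B's while loop computes the spec advance on the two-stack queue
theorem msBWhile_eq (seq : List (Int × Int)) (h_ : Int) (hpos : 0 < h_) (k : Nat) :
    ∀ fuel (l : Nat) front back (covered : Int), l ≤ k →
      front.reverse ++ back = winList seq l k →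
      ∃ front' back',
        msBWhile h_ (seq.getD k (0,0)) fuel front back covered (gAux seq k - gAux seq l) =
          (front', back', covered - (lAux seq (adv seq h_ k fuel l) - lAux seq l),
           gAux seq k - gAux seq (adv seq h_ k fuel l)) ∧
        front'.reverse ++ back' = winList seq (adv seq h_ k fuel l) k := by
  intro fuel
  induction fuel with
  | zero =>
    intro l front back covered hl hq
    refine ⟨front, back, ?_, hq⟩
    simp [msBWhile, adv]
  | succ f ih =>
    intro l front back covered hl hq
    simp only [msBWhile, adv]
    by_cases hc : gAux seq k - gAux seq l ≥ h_
    · simp only [if_pos hc]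
      have hlk : l < k := by
        rcases eq_or_lt_of_le hl with rfl | h
        · omega
        · exact h
      have hQ : front.reverse ++ back = seq.getD l (0,0) :: winList seq (l+1) k := by
        rw [hq, winList_cons seq l k hlk]
      -- front1.reverse ++ back1 = the same queue, with front1 nonempty
      have key : ∀ front1 back1 : List (Int × Int),
          front1 ≠ [] → front1.reverse ++ back1 = seq.getD l (0,0) :: winList seq (l+1) k →
          front1.getLastD (0,0) = seq.getD l (0,0) ∧
          front1.dropLast.reverse ++ back1 = winList seq (l+1) k := by
        intro front1 back1 hne h1
        rcases List.eq_nil_or_concat front1 with rfl | ⟨fs, a, rfl⟩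
        · exact absurd rfl hne
        · rw [List.concat_eq_append] at h1 ⊢
          rw [List.reverse_append] at h1
          simp only [List.reverse_cons, List.reverse_nil, List.nil_append,
            List.cons_append] at h1
          injection h1 with ha ht
          refine ⟨?_, ?_⟩
          · rw [List.getLastD_eq_getLast?, List.getLast?_concat, Option.getD_some]
            exact ha
          · rw [List.dropLast_concat]
            exact ht
      set front1 := if front.isEmpty then back.reverse else front with hf1
      set back1 := if front.isEmpty then ([] : List (Int × Int)) else back with hb1
      have h1 : front1.reverse ++ back1 = seq.getD l (0,0) :: winList seq (l+1) k := by
        by_cases hfe : front.isEmpty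
        · simp only [hf1, hb1, if_pos hfe, List.reverse_reverse, List.append_nil]
          rw [List.isEmpty_iff] at hfe
          subst hfe
          simpa using hQ
        · simp only [hf1, hb1, if_neg hfe]
          exact hQ
      have hne1 : front1 ≠ [] := by
        by_cases hfe : front.isEmpty
        · rw [hf1, if_pos hfe]
          intro hnil
          have hb : back = [] := List.reverse_eq_nil_iff.mp hnil
          rw [List.isEmpty_iff] at hfe
          rw [hfe, hb] at hQ
          simp at hQ
        · rw [hf1, if_neg hfe]
          exact fun hnil => hfe (by simp [hnil])
      obtain ⟨hab, htail⟩ := key front1 back1 hne1 h1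
      have hnxt : (if ¬ front1.dropLast.isEmpty then front1.dropLast.getLastD (0,0)
                   else if ¬ back1.isEmpty then back1.headD (0,0)
                   else seq.getD k (0,0)) = seq.getD (l+1) (0,0) := by
        apply nxt_spec front1.dropLast back1 (winList seq (l+1) k) _ _ htail
        · intro hT
          have hlen := congrArg List.length hT
          simp only [winList_length, List.length_nil] at hlen
          have : l + 1 = k := by omega
          rw [this]
        · intro hT
          have hl1k : l + 1 < k := by
            rcases Nat.lt_or_ge (l+1) k with h | h
            · exact h
            · exfalso
              apply hT
              rw [show l + 1 = k by omega]
              exact winList_nil seq k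
          rw [winList_cons seq (l+1) k hl1k]
          simp
      rw [hab, hnxt]
      rw [show gAux seq k - gAux seq l - ((seq.getD (l+1) (0,0)).1 - (seq.getD l (0,0)).2)
            = gAux seq k - gAux seq (l+1) by simp only [gAux]; ring]
      obtain ⟨front', back', heq, hq'⟩ :=
        ih (l+1) front1.dropLast back1 (covered - ((seq.getD l (0,0)).2 - (seq.getD l (0,0)).1))
          hlk htail
      refine ⟨front', back', ?_, hq'⟩
      rw [heq]
      simp only [Prod.mk.injEq, true_and, and_true]
      simp only [lAux]
      ring
    · simp only [if_neg hc]
      have hle : l = adv seq h_ k 0 l := rfl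
      refine ⟨front, back, ?_, by simpa using hq⟩
      simp [adv]

-- B's fold state invariant
def BInv (seq : List (Int × Int)) (h_ : Int) (m : Nat)
    (st : (List (Int × Int)) × (List (Int × Int)) × Int × Int × Int × Int) : Prop :=
  st.1.reverse ++ st.2.1 = winList seq (specL seq h_ (m-1)) m ∧
  st.2.2.1 = specW seq h_ (m-1) ∧
  st.2.2.2.1 = specAns seq h_ (m-1) ∧
  st.2.2.2.2.1 = gAux seq (m-1) - gAux seq (specL seq h_ (m-1)) ∧
  st.2.2.2.2.2 = (seq.getD (m-1) (0,0)).2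

-- B's main fold invariant
theorem B_main (seq : List (Int × Int)) (h_ : Int) (hpos : 0 < h_) :
    ∀ m : Nat, 1 ≤ m →
      BInv seq h_ m ((winList seq 1 m).foldl
        (fun (st : (List (Int × Int)) × (List (Int × Int)) × Int × Int × Int × Int) cur =>
          let height := st.2.2.2.2.1 + (cur.1 - st.2.2.2.2.2)
          let r := msBWhile h_ cur (st.1.length + st.2.1.length + 1) st.1 st.2.1 st.2.2.1 height
          let covered := r.2.2.1 + (cur.2 - cur.1)
          let best := if covered > st.2.2.2.1 then covered else st.2.2.2.1
          (r.1, r.2.1 ++ [cur], covered, best, r.2.2.2, cur.2))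
        ([PySem.List.pyGetD seq 0 (0,0)], [],
         (PySem.List.pyGetD seq 0 (0,0)).2 - (PySem.List.pyGetD seq 0 (0,0)).1,
         (PySem.List.pyGetD seq 0 (0,0)).2 - (PySem.List.pyGetD seq 0 (0,0)).1,
         0, (PySem.List.pyGetD seq 0 (0,0)).2)) := by
  have hget0 : PySem.List.pyGetD seq 0 (0,0) = seq.getD 0 (0,0) := by
    rw [show (0:Int) = ((0:Nat):Int) from rfl, PySem.List.pyGetD_natCast]
  intro m
  induction m with
  | zero => omega
  | succ m ih =>
    intro h1
    rcases Nat.eq_zero_or_pos m with rfl | hm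
    · rw [show winList seq 1 (0+1) = [] from winList_nil seq 1, List.foldl_nil]
      unfold BInv
      refine ⟨?_, ?_, ?_, ?_, ?_⟩ <;>
        simp [hget0, specL, specW, specAns, lAux, gAux, winList_cons seq 0 1 (by omega),
          winList_nil]
    · obtain ⟨j, rfl⟩ : ∃ j, m = j + 1 := ⟨m - 1, by omega⟩
      rw [winList_append seq 1 (j+1) (by omega), List.foldl_append, List.foldl_cons,
        List.foldl_nil]
      have hIH := ih hm
      unfold BInv at hIH ⊢
      simp only [Nat.add_sub_cancel] at hIH ⊢
      obtain ⟨hq, hcov, hbest, hht, hpe⟩ := hIH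
      set st := (winList seq 1 (j+1)).foldl _ _ with hst
      set l₀ := specL seq h_ j with hl0
      have hl0j : l₀ ≤ j := specL_le seq h_ hpos j
      have hheight : st.2.2.2.2.1 + ((seq.getD (j+1) (0,0)).1 - st.2.2.2.2.2)
          = gAux seq (j+1) - gAux seq l₀ := by
        rw [hht, hpe]
        simp only [gAux]
        ring
      have hfuel : st.1.length + st.2.1.length + 1 = ((j+1) - l₀) + 1 := by
        have := congrArg List.length hq
        simp only [List.length_append, List.length_reverse, winList_length] at this
        omega
      obtain ⟨front', back', heq, hq'⟩ :=
        msBWhile_eq seq h_ hpos (j+1) (((j+1) - l₀) + 1) l₀ st.1 st.2.1 st.2.2.1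
          (by omega) hq
      have hadv : adv seq h_ (j+1) (((j+1) - l₀) + 1) l₀ = specL seq h_ (j+1) := by
        rw [show specL seq h_ (j+1) = adv seq h_ (j+1) (j+1) (specL seq h_ j) from rfl]
        exact adv_stable seq h_ (j+1) hpos (((j+1) - l₀) + 1) (j+1) l₀ (by omega)
          (by omega) (by omega)
      rw [hadv] at heq hq'
      have hl1m : specL seq h_ (j+1) ≤ j + 1 := specL_le seq h_ hpos (j+1)
      have hw : specW seq h_ j - (lAux seq (specL seq h_ (j+1)) - lAux seq l₀) +
            ((seq.getD (j+1) (0,0)).2 - (seq.getD (j+1) (0,0)).1) = specW seq h_ (j+1) := by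
        simp only [specW, lAux, hl0]
        ring
      rw [hcov] at heq
      simp only [hheight, hfuel, hcov, hbest, heq]
      refine ⟨?_, hw, ?_, trivial, trivial⟩
      · simp only [← List.append_assoc, hq']
        exact (winList_append seq (specL seq h_ (j+1)) (j+1) hl1m).symm
      · rw [hw, show specAns seq h_ (j+1) = if specAns seq h_ j < specW seq h_ (j+1)
              then specW seq h_ (j+1) else specAns seq h_ j from rfl]

-- B's slice of the input is the window list of intervals 1 … n-1
theorem rest_eq (seq : List (Int × Int)) (n : Int) (h1 : 1 ≤ n) (h2 : n ≤ seq.length) :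
    PySem.List.slice seq (some 1) (some (max n 0)) = winList seq 1 n.toNat := by
  rw [show max n 0 = n by omega, PySem.List.slice_toNat seq (by omega : (0:Int) ≤ 1) (by omega)]
  have h2' : n.toNat ≤ seq.length := by omega
  apply List.ext_getElem
  · simp [winList_length]
    omega
  · intro i hi1 hi2
    simp only [winList, List.getElem_map, List.getElem_range, List.getElem_take,
      List.getElem_drop]
    simp only [List.length_take, List.length_drop] at hi1
    rw [List.getD_eq_getElem seq (0,0) (by omega)]
    congr 1

-- ===== VERDICT (by name: the statement is the Claim_ definition above) =====
theorem max_size_spec : Claim_equal_max_size := by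
  intro seq n h_ _ hpre
  obtain ⟨hne, h2, hdisj⟩ := hpre
  unfold Spec_max_size
  rcases le_or_gt n 1 with hn1 | hn2
  · -- n ≤ 1: both main loops are empty and both results are the first interval's length + h
    have hslice : PySem.List.slice seq (some 1) (some (max n 0)) = [] := by
      rw [PySem.List.slice_toNat seq (by omega : (0:Int) ≤ 1) (by omega : (0:Int) ≤ max n 0)]
      have : (max n 0).toNat ≤ 1 := by omega
      rw [show (max n 0).toNat - (1:Int).toNat = 0 by omega]
      simp
    simp only [max_size, max_size_alt,
      PySem.List.pyRange_one_eq_nil (show n ≤ (1:Int) from hn1), hslice, List.foldl_nil]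
  · have h3 : 0 < h_ := by
      rcases hdisj with h | h
      · omega
      · exact h
    have hn : ((n.toNat : Nat) : Int) = n := Int.toNat_of_nonneg (by omega)
    have hN1 : 1 ≤ n.toNat := by omega
    have hNlen : n.toNat ≤ seq.length := by
      have : (n : Int) ≤ (seq.length : Int) := h2
      omega
    have hA := A_main seq h_ h3 n.toNat hN1 hNlen
    have hB := (B_main seq h_ h3 n.toNat hN1).2.2.1
    rw [hn] at hA
    have e0 : lAux seq 1 = (PySem.List.pyGetD seq 0 (0,0)).2 - (PySem.List.pyGetD seq 0 (0,0)).1 := by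
      rw [show (0:Int) = ((0:Nat):Int) from rfl, PySem.List.pyGetD_natCast]
      simp [lAux]
    rw [e0] at hA
    show max_size seq n h_ = max_size_alt seq n h_
    simp only [max_size, max_size_alt, rest_eq seq n (by omega) h2]
    simp only [] at hA hB
    rw [hA, hB]
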